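-- pv_equiv track=rewrite | github.com/stanford-policylab/asr-disparities | src/transcript_cleaning_functions.py | fix_state_abbrevs
-- ===== SOURCE A (Python) =====
-- states = {
--     'Alabama': 'AL',
--     'Alaska': 'AK',
--     'Arizona': 'AZ',
--     'Arkansas': 'AR',
--     'California': 'CA',
--     'Colorado': 'CO',
--     'Connecticut': 'CT',
--     'Delaware': 'DE',
--     'Florida': 'FL',
--     'Georgia': 'GA',
--     'Hawaii': 'HI',
--     'Idaho': 'ID',
--     'Illinois': 'IL',
--     'Indiana': 'IN',
--     'Iowa': 'IA',
--     'Kansas': 'KS',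
--     'Kentucky': 'KY',
--     'Louisiana': 'LA',
--     'Maine': 'ME',
--     'Maryland': 'MD',
--     'Massachusetts': 'MA',
--     'Michigan': 'MI',
--     'Minnesota': 'MN',
--     'Mississippi': 'MS',
--     'Missouri': 'MO',
--     'Montana': 'MT',
--     'Nebraska': 'NE',
--     'Nevada': 'NV',
--     'New Hampshire': 'NH',
--     'New Jersey': 'NJ',
--     'New Mexico': 'NM',
--     'New York': 'NY',
--     'North Carolina': 'NC',
--     'North Dakota': 'ND',
--     'Ohio': 'OH',
--     'Oklahoma': 'OK',
--     'Oregon': 'OR',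
--     'Pennsylvania': 'PA',
--     'Rhode Island': 'RI',
--     'South Carolina': 'SC',
--     'South Dakota': 'SD',
--     'Tennessee': 'TN',
--     'Texas': 'TX',
--     'Utah': 'UT',
--     'Vermont': 'VT',
--     'Virginia': 'VA',
--     'Washington': 'WA',
--     'West Virginia': 'WV',
--     'Wisconsin': 'WI',
--     'Wyoming': 'WY',
-- }
--
-- def fix_state_abbrevs(text):
--     # Standardize state abbreviations
--     ix = 0
--     state_result = []
--     wordlist = text.split()
--     while ix < len(wordlist):
--         word = wordlist[ix].lower().capitalize()
--         if word in states.keys(): # is this correct check?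
--             new_word = states[word]
--         elif (ix < len(wordlist)-1) and ((word + ' ' + wordlist[ix+1].lower().capitalize()) in states.keys()):
--             new_word = states[(word + ' ' + wordlist[ix+1].lower().capitalize())]
--             ix += 1
--         else:
--             new_word = word
--         state_result.append(new_word)
--         ix += 1
--     text = ' '.join(state_result)
--     return text
-- ===== SOURCE B (Python) =====
-- # State table kept as one compact data string, parsed once into a dict keyed by
-- # LOWERCASE state names; the text is rewritten in a single forward pass over the
-- # tokens with a result stack that merges the previous word backwards when it
-- # combines with the current word into a two-word state name.
-- _STATE_DATA = (
--     "alabama=AL,alaska=AK,arizona=AZ,arkansas=AR,california=CA,colorado=CO,"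
--     "connecticut=CT,delaware=DE,florida=FL,georgia=GA,hawaii=HI,idaho=ID,"
--     "illinois=IL,indiana=IN,iowa=IA,kansas=KS,kentucky=KY,louisiana=LA,"
--     "maine=ME,maryland=MD,massachusetts=MA,michigan=MI,minnesota=MN,"
--     "mississippi=MS,missouri=MO,montana=MT,nebraska=NE,nevada=NV,"
--     "new hampshire=NH,new jersey=NJ,new mexico=NM,new york=NY,"
--     "north carolina=NC,north dakota=ND,ohio=OH,oklahoma=OK,oregon=OR,"
--     "pennsylvania=PA,rhode island=RI,south carolina=SC,south dakota=SD,"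
--     "tennessee=TN,texas=TX,utah=UT,vermont=VT,virginia=VA,washington=WA,"
--     "west virginia=WV,wisconsin=WI,wyoming=WY")
--
-- _ABBREV = dict(entry.split("=") for entry in _STATE_DATA.split(","))
--
--
-- def fix_state_abbrevs(text):
--     # stack of pairs (output word, lowercase text it came from)
--     stack = []
--     for tok in text.split():
--         w = tok.lower()
--         if stack and (stack[-1][1] + " " + w) in _ABBREV:
--             key = stack[-1][1] + " " + w
--             stack[-1] = (_ABBREV[key], key)
--         elif w in _ABBREV:
--             stack.append((_ABBREV[w], w))
--         else:
--             stack.append((w.capitalize(), w))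
--     return " ".join(p[0] for p in stack)
-- ===== Notes on version B (the rewrite author's own statement) =====
-- stated objective: alternative
-- what changed: Replaced the index loop with one-word lookahead-and-skip over a capitalized-key dict literal by a single forward pass keeping a result stack of (output, lowercase-source) pairs that merges the previous entry backwards when it combines with the current word into a two-word state name, looked up in a lowercase-keyed table parsed once from a compact data string.
import Mathlib
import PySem

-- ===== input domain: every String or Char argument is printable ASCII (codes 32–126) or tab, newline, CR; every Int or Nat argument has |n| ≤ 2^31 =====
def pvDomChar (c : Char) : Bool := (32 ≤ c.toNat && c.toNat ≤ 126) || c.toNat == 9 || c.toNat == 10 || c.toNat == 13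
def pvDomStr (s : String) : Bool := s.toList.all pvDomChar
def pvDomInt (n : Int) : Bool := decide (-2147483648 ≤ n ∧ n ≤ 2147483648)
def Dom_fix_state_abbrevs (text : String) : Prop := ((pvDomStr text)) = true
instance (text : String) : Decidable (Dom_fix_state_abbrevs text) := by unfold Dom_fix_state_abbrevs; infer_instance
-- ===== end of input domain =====

-- B replaces A's index loop with one-word lookahead-and-skip over a
-- capitalized-key dict literal by a single forward pass keeping a result stack
-- of (output, lowercase source) pairs that merges the previous entry backwards
-- into a two-word state name, looked up in a lowercase-keyed table parsed once
-- from a compact data string (objective: alternative; same cost).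

-- ===== PORT A =====
-- the Python module-level dict `states`
def statesDict : PySem.Dict String String := PySem.Dict.mk [
  ("Alabama", "AL"),
  ("Alaska", "AK"),
  ("Arizona", "AZ"),
  ("Arkansas", "AR"),
  ("California", "CA"),
  ("Colorado", "CO"),
  ("Connecticut", "CT"),
  ("Delaware", "DE"),
  ("Florida", "FL"),
  ("Georgia", "GA"),
  ("Hawaii", "HI"),
  ("Idaho", "ID"),
  ("Illinois", "IL"),
  ("Indiana", "IN"),
  ("Iowa", "IA"),
  ("Kansas", "KS"),
  ("Kentucky", "KY"),
  ("Louisiana", "LA"),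
  ("Maine", "ME"),
  ("Maryland", "MD"),
  ("Massachusetts", "MA"),
  ("Michigan", "MI"),
  ("Minnesota", "MN"),
  ("Mississippi", "MS"),
  ("Missouri", "MO"),
  ("Montana", "MT"),
  ("Nebraska", "NE"),
  ("Nevada", "NV"),
  ("New Hampshire", "NH"),
  ("New Jersey", "NJ"),
  ("New Mexico", "NM"),
  ("New York", "NY"),
  ("North Carolina", "NC"),
  ("North Dakota", "ND"),
  ("Ohio", "OH"),
  ("Oklahoma", "OK"),
  ("Oregon", "OR"),
  ("Pennsylvania", "PA"),
  ("Rhode Island", "RI"),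
  ("South Carolina", "SC"),
  ("South Dakota", "SD"),
  ("Tennessee", "TN"),
  ("Texas", "TX"),
  ("Utah", "UT"),
  ("Vermont", "VT"),
  ("Virginia", "VA"),
  ("Washington", "WA"),
  ("West Virginia", "WV"),
  ("Wisconsin", "WI"),
  ("Wyoming", "WY")]

-- `s.capitalize()` — ported by hand (no PySem primitive): first char uppercased,
-- rest lowercased; exact on the printable-ASCII domain
def pyCapitalize (s : String) : String :=
  match s.toList with
  | [] => ""
  | c :: cs => String.ofList (PySem.Chars.upperChar c :: PySem.Chars.lower cs)

-- `word.lower().capitalize()`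
def pyNorm (w : String) : String := pyCapitalize (PySem.Str.lower w)

-- A's while loop: ix over wordlist, single-word lookup first, then the
-- one-word lookahead that also skips the next index.  (Inside the loop
-- ix < wl.length, so the Nat subtraction in `ix < wl.length - 1` matches
-- Python's `ix < len(wordlist)-1`.)
def fixLoopA (wl : List String) (ix : Nat) (res : List String) : List String :=
  if h : ix < wl.length then
    let word := pyNorm (wl.getD ix "")
    if statesDict.contains word then
      fixLoopA wl (ix + 1) (res ++ [statesDict.getD word ""])
    else if ix < wl.length - 1 &&
        statesDict.contains (word ++ " " ++ pyNorm (wl.getD (ix + 1) "")) then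
      fixLoopA wl (ix + 2)
        (res ++ [statesDict.getD (word ++ " " ++ pyNorm (wl.getD (ix + 1) "")) ""])
    else
      fixLoopA wl (ix + 1) (res ++ [word])
  else res
termination_by wl.length - ix
decreasing_by all_goals omega

def fix_state_abbrevs (text : String) : String :=
  PySem.Str.join " " (fixLoopA (PySem.Str.split₀ text) 0 [])

-- ===== PORT B =====
-- the compact data string `_STATE_DATA`
def stateData : String :=
  "alabama=AL,alaska=AK,arizona=AZ,arkansas=AR,california=CA,colorado=CO," ++
  "connecticut=CT,delaware=DE,florida=FL,georgia=GA,hawaii=HI,idaho=ID," ++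
  "illinois=IL,indiana=IN,iowa=IA,kansas=KS,kentucky=KY,louisiana=LA," ++
  "maine=ME,maryland=MD,massachusetts=MA,michigan=MI,minnesota=MN," ++
  "mississippi=MS,missouri=MO,montana=MT,nebraska=NE,nevada=NV," ++
  "new hampshire=NH,new jersey=NJ,new mexico=NM,new york=NY," ++
  "north carolina=NC,north dakota=ND,ohio=OH,oklahoma=OK,oregon=OR," ++
  "pennsylvania=PA,rhode island=RI,south carolina=SC,south dakota=SD," ++
  "tennessee=TN,texas=TX,utah=UT,vermont=VT,virginia=VA,washington=WA," ++
  "west virginia=WV,wisconsin=WI,wyoming=WY"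

-- `_ABBREV = dict(entry.split("=") for entry in _STATE_DATA.split(","))`
-- (each entry splits into exactly two parts; the `_` arm is unreachable on
-- this data and stands for the ValueError dict() would raise)
def statesLow : PySem.Dict String String :=
  PySem.Dict.mk ((((PySem.Str.split? stateData ",").getD []).map (fun entry =>
    match (PySem.Str.split? entry "=").getD [] with
    | [k, v] => (k, v)
    | _ => ("", ""))))

-- B's loop body: the Python stack of (output word, lowercase source) pairs is
-- kept as a cons stack (head = stack[-1]), reversed once at the end.
def stepB (stk : List (String × String)) (tok : String) : List (String × String) :=
  let w := PySem.Str.lower tok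
  match stk with
  | (p, plow) :: rest =>
    if statesLow.contains (plow ++ " " ++ w) then
      (statesLow.getD (plow ++ " " ++ w) "", plow ++ " " ++ w) :: rest
    else if statesLow.contains w then
      (statesLow.getD w "", w) :: (p, plow) :: rest
    else
      (pyCapitalize w, w) :: (p, plow) :: rest
  | [] =>
    if statesLow.contains w then [(statesLow.getD w "", w)]
    else [(pyCapitalize w, w)]

def fix_state_abbrevs_alt (text : String) : String :=
  PySem.Str.join " " ((((PySem.Str.split₀ text).foldl stepB []).reverse).map Prod.fst)

-- ===== PRECONDITION & SPEC =====
def Spec_fix_state_abbrevs (text : String) (out : String) : Prop := out = fix_state_abbrevs_alt text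
instance (text : String) (out : String) : Decidable (Spec_fix_state_abbrevs text out) := by unfold Spec_fix_state_abbrevs; infer_instance

-- ===== CLAIM (what is proved, stated in full; the proofs are below) =====
def Claim_equal_fix_state_abbrevs : Prop := ∀ (text : String), Dom_fix_state_abbrevs text → Spec_fix_state_abbrevs text (fix_state_abbrevs text)

-- ===== LEMMAS AND PROOFS =====
set_option maxRecDepth 10000
set_option maxHeartbeats 1000000

-- ---- character facts ----

theorem toNat_ofNat_valid (n : Nat) (h : n < 0xd800) : (Char.ofNat n).toNat = n := by
  have hv : n.isValidChar := Or.inl h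
  simp only [Char.ofNat, dif_pos hv]
  rfl

theorem char_eq_of_toNat {a b : Char} (h : a.toNat = b.toNat) : a = b :=
  Char.ext (UInt32.toNat_inj.mp h)

theorem char_le_iff (a c : Char) : (a ≤ c) ↔ a.toNat ≤ c.toNat := by
  rw [Char.le_def]; exact Iff.rfl

theorem lowerChar_toNat (c : Char) : (PySem.Chars.lowerChar c).toNat =
    if 65 ≤ c.toNat ∧ c.toNat ≤ 90 then c.toNat + 32 else c.toNat := by
  unfold PySem.Chars.lowerChar PySem.Chars.isupper
  by_cases h : 65 ≤ c.toNat ∧ c.toNat ≤ 90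
  · have hb : (decide ('A' ≤ c) && decide (c ≤ 'Z')) = true := by
      simp only [Bool.and_eq_true, decide_eq_true_eq, char_le_iff]
      have hA : 'A'.toNat = 65 := rfl
      have hZ : 'Z'.toNat = 90 := rfl
      omega
    rw [if_pos hb, if_pos h, toNat_ofNat_valid _ (by omega)]
  · have hb : (decide ('A' ≤ c) && decide (c ≤ 'Z')) = false := by
      simp only [Bool.and_eq_false_iff, decide_eq_false_iff_not, char_le_iff]
      have hA : 'A'.toNat = 65 := rfl
      have hZ : 'Z'.toNat = 90 := rfl
      omega
    rw [if_neg (by simp [hb]), if_neg h]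

theorem upperChar_toNat (c : Char) : (PySem.Chars.upperChar c).toNat =
    if 97 ≤ c.toNat ∧ c.toNat ≤ 122 then c.toNat - 32 else c.toNat := by
  unfold PySem.Chars.upperChar PySem.Chars.islower
  by_cases h : 97 ≤ c.toNat ∧ c.toNat ≤ 122
  · have hb : (decide ('a' ≤ c) && decide (c ≤ 'z')) = true := by
      simp only [Bool.and_eq_true, decide_eq_true_eq, char_le_iff]
      have ha : 'a'.toNat = 97 := rfl
      have hz : 'z'.toNat = 122 := rfl
      omega
    rw [if_pos hb, if_pos h, toNat_ofNat_valid _ (by omega)]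
  · have hb : (decide ('a' ≤ c) && decide (c ≤ 'z')) = false := by
      simp only [Bool.and_eq_false_iff, decide_eq_false_iff_not, char_le_iff]
      have ha : 'a'.toNat = 97 := rfl
      have hz : 'z'.toNat = 122 := rfl
      omega
    rw [if_neg (by simp [hb]), if_neg h]

theorem lowerChar_upperChar (c : Char) :
    PySem.Chars.lowerChar (PySem.Chars.upperChar c) = PySem.Chars.lowerChar c := by
  apply char_eq_of_toNat
  simp only [lowerChar_toNat, upperChar_toNat]
  split_ifs <;> omega

theorem lowerChar_idem (c : Char) :
    PySem.Chars.lowerChar (PySem.Chars.lowerChar c) = PySem.Chars.lowerChar c := by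
  apply char_eq_of_toNat
  simp only [lowerChar_toNat]
  split_ifs <;> omega

theorem isspace_iff_toNat (c : Char) : PySem.Chars.isspace c = true ↔
    (c.toNat = 32 ∨ (9 ≤ c.toNat ∧ c.toNat ≤ 13) ∨ (28 ≤ c.toNat ∧ c.toNat ≤ 31) ∨
     c.toNat = 133 ∨ c.toNat = 160 ∨ c.toNat = 5760 ∨ (8192 ≤ c.toNat ∧ c.toNat ≤ 8202) ∨
     c.toNat = 8232 ∨ c.toNat = 8233 ∨ c.toNat = 8239 ∨ c.toNat = 8287 ∨ c.toNat = 12288) := by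
  unfold PySem.Chars.isspace
  simp only [Bool.or_eq_true, Bool.and_eq_true, decide_eq_true_eq]
  tauto

theorem isspace_lowerChar (c : Char) :
    PySem.Chars.isspace (PySem.Chars.lowerChar c) = PySem.Chars.isspace c := by
  by_cases h : 65 ≤ c.toNat ∧ c.toNat ≤ 90
  · have h1 : PySem.Chars.isspace (PySem.Chars.lowerChar c) = false := by
      rw [Bool.eq_false_iff]; intro hc
      rw [isspace_iff_toNat, lowerChar_toNat, if_pos h] at hc
      omega
    have h2 : PySem.Chars.isspace c = false := by
      rw [Bool.eq_false_iff]; intro hc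
      rw [isspace_iff_toNat] at hc
      omega
    rw [h1, h2]
  · have : PySem.Chars.lowerChar c = c := by
      apply char_eq_of_toNat
      rw [lowerChar_toNat, if_neg h]
    rw [this]

-- ---- lower-fixed / space-free lists and the word capitalizer ----

-- `SFl l`: no whitespace character in l
def SFl (l : List Char) : Prop := ∀ c ∈ l, PySem.Chars.isspace c = false

-- per-word capitalizer: uppercase after a space / at the start, lowercase inside a word
def capW : Bool → List Char → List Char
  | _, [] => []
  | b, c :: cs =>
    if PySem.Chars.isspace c then c :: capW true cs
    else (if b then PySem.Chars.upperChar c else PySem.Chars.lowerChar c) :: capW false cs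

def capS (s : String) : String := String.ofList (capW true s.toList)

theorem lower_capW (b : Bool) (l : List Char) :
    PySem.Chars.lower (capW b l) = PySem.Chars.lower l := by
  induction l generalizing b with
  | nil => rfl
  | cons c cs ih =>
    unfold capW
    split_ifs with hs hb
    · simp only [PySem.Chars.lower, List.map_cons] at ih ⊢
      rw [ih]
    · simp only [PySem.Chars.lower, List.map_cons] at ih ⊢
      rw [ih, lowerChar_upperChar]
    · simp only [PySem.Chars.lower, List.map_cons] at ih ⊢
      rw [ih, lowerChar_idem]

theorem lower_idem (l : List Char) :
    PySem.Chars.lower (PySem.Chars.lower l) = PySem.Chars.lower l := by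
  simp only [PySem.Chars.lower, List.map_map]
  exact List.map_congr_left (fun c _ => lowerChar_idem c)

theorem str_ext {a b : String} (h : a.toList = b.toList) : a = b := by
  have := congrArg String.ofList h
  simpa using this

theorem capS_inj {s t : String}
    (hs : PySem.Chars.lower s.toList = s.toList)
    (ht : PySem.Chars.lower t.toList = t.toList)
    (h : capS s = capS t) : s = t := by
  apply str_ext
  have h' : capW true s.toList = capW true t.toList := by
    have := congrArg String.toList h
    simpa [capS] using this
  calc s.toList = PySem.Chars.lower s.toList := hs.symm
    _ = PySem.Chars.lower (capW true s.toList) := (lower_capW _ _).symm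
    _ = PySem.Chars.lower (capW true t.toList) := by rw [h']
    _ = PySem.Chars.lower t.toList := lower_capW _ _
    _ = t.toList := ht

theorem capW_false_of_SF (l : List Char) (h : SFl l) :
    capW false l = PySem.Chars.lower l := by
  induction l with
  | nil => rfl
  | cons c cs ih =>
    unfold capW
    rw [if_neg (by simp [h c (by simp)])]
    simp only [PySem.Chars.lower, List.map_cons]
    rw [ih (fun x hx => h x (by simp [hx]))]
    rfl

theorem capS_eq_pyCapitalize (s : String) (h : SFl s.toList) :
    capS s = pyCapitalize s := by
  unfold capS pyCapitalize
  cases hl : s.toList with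
  | nil => rfl
  | cons c cs =>
    rw [hl] at h
    unfold capW
    rw [if_neg (by simp [h c (by simp)]), if_pos rfl,
      capW_false_of_SF cs (fun x hx => h x (by simp [hx]))]

theorem capW_append_space (l1 l2 : List Char) (h : SFl l1) (b : Bool) :
    capW b (l1 ++ ' ' :: l2) = capW b l1 ++ ' ' :: capW true l2 := by
  induction l1 generalizing b with
  | nil =>
    simp only [List.nil_append, capW]
    rw [if_pos (by decide)]
  | cons c cs ih =>
    have hcn : PySem.Chars.isspace c = false := h c (by simp)
    have ih' := ih (fun x hx => h x (by simp [hx])) false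
    simp only [List.cons_append, capW, hcn, Bool.false_eq_true, if_false, ih']

theorem toList_append3 (a b : String) :
    (a ++ " " ++ b).toList = a.toList ++ ' ' :: b.toList := by
  simp [String.toList_append]

theorem capS_append (a b : String) (ha : SFl a.toList) :
    capS (a ++ " " ++ b) = capS a ++ " " ++ capS b := by
  apply str_ext
  simp only [capS, toList_append3]
  rw [capW_append_space _ _ ha]
  simp

-- ---- the lowercase pair table and the two dict literals ----

def pairsLow : List (String × String) := [
  ("alabama", "AL"), ("alaska", "AK"), ("arizona", "AZ"), ("arkansas", "AR"),
  ("california", "CA"), ("colorado", "CO"), ("connecticut", "CT"), ("delaware", "DE"),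
  ("florida", "FL"), ("georgia", "GA"), ("hawaii", "HI"), ("idaho", "ID"),
  ("illinois", "IL"), ("indiana", "IN"), ("iowa", "IA"), ("kansas", "KS"),
  ("kentucky", "KY"), ("louisiana", "LA"), ("maine", "ME"), ("maryland", "MD"),
  ("massachusetts", "MA"), ("michigan", "MI"), ("minnesota", "MN"), ("mississippi", "MS"),
  ("missouri", "MO"), ("montana", "MT"), ("nebraska", "NE"), ("nevada", "NV"),
  ("new hampshire", "NH"), ("new jersey", "NJ"), ("new mexico", "NM"), ("new york", "NY"),
  ("north carolina", "NC"), ("north dakota", "ND"), ("ohio", "OH"), ("oklahoma", "OK"),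
  ("oregon", "OR"), ("pennsylvania", "PA"), ("rhode island", "RI"), ("south carolina", "SC"),
  ("south dakota", "SD"), ("tennessee", "TN"), ("texas", "TX"), ("utah", "UT"),
  ("vermont", "VT"), ("virginia", "VA"), ("washington", "WA"), ("west virginia", "WV"),
  ("wisconsin", "WI"), ("wyoming", "WY")]

set_option maxRecDepth 10000 in
set_option maxHeartbeats 1000000 in
theorem statesLow_eq : statesLow = PySem.Dict.mk pairsLow := by decide

set_option maxRecDepth 10000 in
set_option maxHeartbeats 1000000 in
theorem statesDict_eq :
    statesDict = PySem.Dict.mk (pairsLow.map (fun p => (capS p.1, p.2))) := by decide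

set_option maxRecDepth 10000 in
set_option maxHeartbeats 1000000 in
theorem pairsLow_LF : ∀ p ∈ pairsLow, PySem.Chars.lower p.1.toList = p.1.toList := by decide

-- ---- dict lookup transfer between the capitalized and lowercase tables ----

theorem get?_mk_map_cap (P : List (String × String))
    (hP : ∀ p ∈ P, PySem.Chars.lower p.1.toList = p.1.toList)
    (t : String) (ht : PySem.Chars.lower t.toList = t.toList) :
    (PySem.Dict.mk (P.map (fun p => (capS p.1, p.2)))).get? (capS t) =
      (PySem.Dict.mk P).get? t := by
  induction P with
  | nil => rfl
  | cons p rest ih =>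
    simp only [List.map_cons]
    rw [PySem.Dict.get?_mk_cons, PySem.Dict.get?_mk_cons]
    have hbeq : (capS p.1 == capS t) = (p.1 == t) := by
      by_cases h : p.1 = t
      · rw [h]; simp
      · have : capS p.1 ≠ capS t := fun hc =>
          h (capS_inj (hP p (by simp)) ht hc)
        simp [h, this]
    rw [hbeq]
    split
    · rfl
    · exact ih (fun q hq => hP q (by simp [hq]))

theorem contains_transfer (t : String)
    (ht : PySem.Chars.lower t.toList = t.toList) :
    statesDict.contains (capS t) = statesLow.contains t := by
  rw [PySem.Dict.contains_eq_isSome_get?, PySem.Dict.contains_eq_isSome_get?,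
    statesDict_eq, statesLow_eq, get?_mk_map_cap _ pairsLow_LF _ ht]

theorem getD_transfer (t : String)
    (ht : PySem.Chars.lower t.toList = t.toList) :
    statesDict.getD (capS t) "" = statesLow.getD t "" := by
  rw [PySem.Dict.getD_eq_get?_getD, PySem.Dict.getD_eq_get?_getD,
    statesDict_eq, statesLow_eq, get?_mk_map_cap _ pairsLow_LF _ ht]

-- ---- normalized tokens ----

theorem SF_lower (w : String) (h : SFl w.toList) : SFl (PySem.Str.lower w).toList := by
  intro c hc
  simp only [PySem.Str.toList_lower, PySem.Chars.lower, List.mem_map] at hc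
  obtain ⟨d, hd, rfl⟩ := hc
  rw [isspace_lowerChar]
  exact h d hd

theorem LF_lower (w : String) :
    PySem.Chars.lower (PySem.Str.lower w).toList = (PySem.Str.lower w).toList := by
  simp only [PySem.Str.toList_lower]
  exact lower_idem _

theorem pyNorm_eq_capS (w : String) (h : SFl w.toList) :
    pyNorm w = capS (PySem.Str.lower w) :=
  (capS_eq_pyCapitalize _ (SF_lower w h)).symm

theorem LF_pair (a b : String)
    (ha : PySem.Chars.lower a.toList = a.toList)
    (hb : PySem.Chars.lower b.toList = b.toList) :
    PySem.Chars.lower (a ++ " " ++ b).toList = (a ++ " " ++ b).toList := by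
  rw [toList_append3]
  simp only [PySem.Chars.lower, List.map_append, List.map_cons] at ha hb ⊢
  rw [ha, hb, show PySem.Chars.lowerChar ' ' = ' ' from by decide]

-- tokens produced by str.split() contain no whitespace characters
theorem split₀_go_SF (s : List Char) : ∀ (cur : List Char) (acc : List (List Char)),
    SFl cur → (∀ l ∈ acc, SFl l) →
    ∀ l ∈ PySem.Chars.split₀.go s cur acc, SFl l := by
  induction s with
  | nil =>
    intro cur acc hc ha l hl
    simp only [PySem.Chars.split₀.go] at hl
    split_ifs at hl with h
    · rw [List.mem_reverse] at hl
      exact ha l hl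
    · rw [List.mem_reverse] at hl
      rcases List.mem_cons.mp hl with rfl | hl
      · intro c hcm
        exact hc c (List.mem_reverse.mp hcm)
      · exact ha l hl
  | cons c rest ih =>
    intro cur acc hc ha l hl
    simp only [PySem.Chars.split₀.go] at hl
    split_ifs at hl with h1 h2
    · exact ih [] acc (by intro x hx; simp at hx) ha l hl
    · refine ih [] _ (by intro x hx; simp at hx) ?_ l hl
      intro m hm
      rcases List.mem_cons.mp hm with rfl | hm
      · intro x hx
        exact hc x (List.mem_reverse.mp hx)
      · exact ha m hm
    · refine ih (c :: cur) acc ?_ ha l hl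
      intro x hx
      rcases List.mem_cons.mp hx with rfl | hx
      · exact Bool.eq_false_iff.mpr h1
      · exact hc x hx

theorem split₀_SF (s : String) : ∀ t ∈ PySem.Str.split₀ s, SFl t.toList := by
  intro t ht
  unfold PySem.Str.split₀ at ht
  simp only [List.mem_map] at ht
  obtain ⟨l, hl, rfl⟩ := ht
  unfold PySem.Chars.split₀ at hl
  have := split₀_go_SF s.toList [] [] (by intro c hc; simp at hc) (by simp) l hl
  simpa using this

-- ---- the common reference recursion, in lowercase space, with pairs ----

def procP : List String → List (String × String)
  | [] => []
  | w :: rest =>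
    if statesLow.contains w then (statesLow.getD w "", w) :: procP rest
    else
      match rest with
      | [] => [(pyCapitalize w, w)]
      | w2 :: rest' =>
        if statesLow.contains (w ++ " " ++ w2) then
          (statesLow.getD (w ++ " " ++ w2) "", w ++ " " ++ w2) :: procP rest'
        else (pyCapitalize w, w) :: procP (w2 :: rest')

theorem procP_cons_pos (w : String) (rest : List String)
    (hc : statesLow.contains w = true) :
    procP (w :: rest) = (statesLow.getD w "", w) :: procP rest := by
  rw [procP.eq_def]; simp [hc]

theorem procP_one (w : String) (hc : statesLow.contains w = false) :
    procP [w] = [(pyCapitalize w, w)] := by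
  rw [procP.eq_def]; simp [hc]

theorem procP_cons2_pos (w w2 : String) (rest' : List String)
    (hc : statesLow.contains w = false)
    (h2 : statesLow.contains (w ++ " " ++ w2) = true) :
    procP (w :: w2 :: rest') =
      (statesLow.getD (w ++ " " ++ w2) "", w ++ " " ++ w2) :: procP rest' := by
  rw [procP.eq_def]; simp [hc, h2]

theorem procP_cons2_neg (w w2 : String) (rest' : List String)
    (hc : statesLow.contains w = false)
    (h2 : statesLow.contains (w ++ " " ++ w2) = false) :
    procP (w :: w2 :: rest') = (pyCapitalize w, w) :: procP (w2 :: rest') := by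
  rw [procP.eq_def]; simp [hc, h2]

-- ---- A reduces to procP ----

def procA : List String → List String
  | [] => []
  | w :: rest =>
    if statesDict.contains w then statesDict.getD w "" :: procA rest
    else
      match rest with
      | [] => [w]
      | w2 :: rest' =>
        if statesDict.contains (w ++ " " ++ w2) then
          statesDict.getD (w ++ " " ++ w2) "" :: procA rest'
        else w :: procA (w2 :: rest')

theorem procA_cons_pos (w : String) (rest : List String)
    (hc : statesDict.contains w = true) :
    procA (w :: rest) = statesDict.getD w "" :: procA rest := by
  rw [procA.eq_def]; simp [hc]

theorem procA_one (w : String) (hc : statesDict.contains w = false) :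
    procA [w] = [w] := by
  rw [procA.eq_def]; simp [hc]

theorem procA_cons2_pos (w w2 : String) (rest' : List String)
    (hc : statesDict.contains w = false)
    (h2 : statesDict.contains (w ++ " " ++ w2) = true) :
    procA (w :: w2 :: rest') = statesDict.getD (w ++ " " ++ w2) "" :: procA rest' := by
  rw [procA.eq_def]; simp [hc, h2]

theorem procA_cons2_neg (w w2 : String) (rest' : List String)
    (hc : statesDict.contains w = false)
    (h2 : statesDict.contains (w ++ " " ++ w2) = false) :
    procA (w :: w2 :: rest') = w :: procA (w2 :: rest') := by
  rw [procA.eq_def]; simp [hc, h2]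

theorem fixLoopA_eq_procA (wl : List String) (ix : Nat) (res : List String) :
    fixLoopA wl ix res = res ++ procA ((wl.drop ix).map pyNorm) := by
  fun_induction fixLoopA wl ix res with
  | case1 ix res h word hc ih =>
    have hg : wl.getD ix "" = wl[ix] := List.getD_eq_getElem _ _ h
    rw [ih, List.drop_eq_getElem_cons h]
    simp only [List.map_cons, word, hg] at hc ⊢
    rw [procA_cons_pos _ _ hc]
    simp
  | case2 ix res h word hc hc2 ih =>
    obtain ⟨h1, h2⟩ := Bool.and_eq_true_iff.mp hc2
    have h1' : ix + 1 < wl.length := by have := of_decide_eq_true h1; omega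
    have hg : wl.getD ix "" = wl[ix] := List.getD_eq_getElem _ _ h
    have hg2 : wl.getD (ix + 1) "" = wl[ix + 1] := List.getD_eq_getElem _ _ h1'
    rw [ih, List.drop_eq_getElem_cons h, List.drop_eq_getElem_cons h1']
    simp only [List.map_cons, word, hg, hg2] at hc h2 ⊢
    rw [procA_cons2_pos _ _ _ (Bool.eq_false_iff.mpr hc) h2]
    simp
  | case3 ix res h word hc hc2 ih =>
    have hg : wl.getD ix "" = wl[ix] := List.getD_eq_getElem _ _ h
    rw [ih, List.drop_eq_getElem_cons h]
    by_cases h1 : ix + 1 < wl.length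
    · have h1d : decide (ix < wl.length - 1) = true := by simp; omega
      rw [h1d, Bool.true_and] at hc2
      have hg2 : wl.getD (ix + 1) "" = wl[ix + 1] := List.getD_eq_getElem _ _ h1
      rw [List.drop_eq_getElem_cons h1]
      simp only [List.map_cons, word, hg, hg2] at hc hc2 ⊢
      rw [procA_cons2_neg _ _ _ (Bool.eq_false_iff.mpr hc) (Bool.eq_false_iff.mpr hc2)]
      simp
    · have hd : wl.drop (ix + 1) = [] := List.drop_eq_nil_of_le (by omega)
      rw [hd]
      simp only [List.map_cons, List.map_nil, word, hg] at hc ⊢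
      rw [procA_one _ (Bool.eq_false_iff.mpr hc)]
      simp [procA]
  | case4 ix res h =>
    have hd : wl.drop ix = [] := List.drop_eq_nil_of_le (by omega)
    simp [hd, procA]

-- procA on the capitalized words equals procP (mapped to outputs) on the lowercased words
theorem procA_eq_procP (n : Nat) : ∀ ws : List String, ws.length ≤ n →
    (∀ w ∈ ws, SFl w.toList) →
    procA (ws.map pyNorm) = (procP (ws.map PySem.Str.lower)).map Prod.fst := by
  induction n with
  | zero =>
    intro ws hlen _
    have : ws = [] := List.eq_nil_of_length_eq_zero (by omega)
    subst this
    simp [procA, procP]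
  | succ m ih =>
    intro ws hlen hws
    match ws with
    | [] => simp [procA, procP]
    | w :: rest =>
      have hw : SFl w.toList := hws w (by simp)
      have hlw := LF_lower w
      have hc1 : statesDict.contains (pyNorm w) = statesLow.contains (PySem.Str.lower w) := by
        rw [pyNorm_eq_capS w hw, contains_transfer _ hlw]
      cases hc : statesLow.contains (PySem.Str.lower w) with
      | true =>
        simp only [List.map_cons]
        rw [procA_cons_pos _ _ (hc1.trans hc), procP_cons_pos _ _ hc,
          ih rest (by simp at hlen; omega) (fun x hx => hws x (by simp [hx]))]
        simp only [List.map_cons]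
        rw [pyNorm_eq_capS w hw, getD_transfer _ hlw]
      | false =>
        match rest with
        | [] =>
          simp only [List.map_cons, List.map_nil]
          rw [procA_one _ (hc1.trans hc), procP_one _ hc]
          simp [pyNorm]
        | w2 :: rest' =>
          have hw2 : SFl w2.toList := hws w2 (by simp)
          have hlw2 := LF_lower w2
          have hpair : pyNorm w ++ " " ++ pyNorm w2 =
              capS (PySem.Str.lower w ++ " " ++ PySem.Str.lower w2) := by
            rw [pyNorm_eq_capS w hw, pyNorm_eq_capS w2 hw2,
              capS_append _ _ (SF_lower w hw)]
          have hc2 : statesDict.contains (pyNorm w ++ " " ++ pyNorm w2) =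
              statesLow.contains (PySem.Str.lower w ++ " " ++ PySem.Str.lower w2) := by
            rw [hpair, contains_transfer _ (LF_pair _ _ hlw hlw2)]
          cases hp : statesLow.contains (PySem.Str.lower w ++ " " ++ PySem.Str.lower w2) with
          | true =>
            simp only [List.map_cons]
            rw [procA_cons2_pos _ _ _ (hc1.trans hc) (hc2.trans hp),
              procP_cons2_pos _ _ _ hc hp,
              ih rest' (by simp at hlen; omega) (fun x hx => hws x (by simp [hx]))]
            simp only [List.map_cons]
            rw [hpair, getD_transfer _ (LF_pair _ _ hlw hlw2)]
          | false =>
            simp only [List.map_cons]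
            rw [procA_cons2_neg _ _ _ (hc1.trans hc) (hc2.trans hp),
              procP_cons2_neg _ _ _ hc hp]
            simp only [← List.map_cons]
            rw [ih (w2 :: rest') (by simp at hlen ⊢; omega)
                (fun x hx => hws x (by simp at hx ⊢; tauto))]
            simp [pyNorm]

-- ---- B reduces to procP ----

-- a key of the lowercase table never extends to another key
set_option maxRecDepth 10000 in
set_option maxHeartbeats 1000000 in
theorem keys_no_prefix : ∀ k ∈ (PySem.Dict.mk pairsLow).keys,
    ∀ k' ∈ (PySem.Dict.mk pairsLow).keys,
      (k.toList ++ [' ']).isPrefixOf k'.toList = false := by decide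

theorem key_no_extend (k x : String) (hk : statesLow.contains k = true) :
    statesLow.contains (k ++ " " ++ x) = false := by
  by_contra h
  rw [Bool.not_eq_false, PySem.Dict.contains_iff_mem_keys] at h
  rw [PySem.Dict.contains_iff_mem_keys] at hk
  rw [statesLow_eq] at h hk
  have hpre := keys_no_prefix k hk _ h
  rw [toList_append3] at hpre
  have : (k.toList ++ [' ']).isPrefixOf (k.toList ++ ' ' :: x.toList) = true := by
    rw [List.isPrefixOf_iff_prefix]
    exact ⟨x.toList, by simp⟩
  rw [this] at hpre
  exact absurd hpre (by simp)

-- stepB on an already-lowered word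
def stepP (stk : List (String × String)) (w : String) : List (String × String) :=
  match stk with
  | (p, plow) :: rest =>
    if statesLow.contains (plow ++ " " ++ w) then
      (statesLow.getD (plow ++ " " ++ w) "", plow ++ " " ++ w) :: rest
    else if statesLow.contains w then
      (statesLow.getD w "", w) :: (p, plow) :: rest
    else
      (pyCapitalize w, w) :: (p, plow) :: rest
  | [] =>
    if statesLow.contains w then [(statesLow.getD w "", w)]
    else [(pyCapitalize w, w)]

-- the head of the stack cannot merge with the next incoming word
def NoMergeP (stk : List (String × String)) (ws : List String) : Prop :=
  ∀ p ∈ stk.head?, ∀ w ∈ ws.head?, statesLow.contains (p.2 ++ " " ++ w) = false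

theorem stepP_no_merge (stk : List (String × String)) (w : String)
    (h : ∀ p ∈ stk.head?, statesLow.contains (p.2 ++ " " ++ w) = false) :
    stepP stk w =
      if statesLow.contains w then (statesLow.getD w "", w) :: stk
      else (pyCapitalize w, w) :: stk := by
  cases stk with
  | nil => simp [stepP]
  | cons p r =>
    have hp := h p (by simp)
    cases p with
    | mk a b => simp [stepP, hp]

theorem noMergeP_key (v k : String) (stk : List (String × String)) (ws : List String)
    (hk : statesLow.contains k = true) : NoMergeP ((v, k) :: stk) ws := by
  intro p hp w _
  simp only [List.head?_cons, Option.mem_some_iff] at hp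
  subst hp
  exact key_no_extend _ _ hk

theorem foldl_stepP_eq_procP (n : Nat) :
    ∀ ws : List String, ∀ stk : List (String × String), ws.length ≤ n →
      NoMergeP stk ws → ws.foldl stepP stk = (procP ws).reverse ++ stk := by
  induction n with
  | zero =>
    intro ws stk hlen _
    have : ws = [] := List.eq_nil_of_length_eq_zero (by omega)
    subst this
    simp [procP]
  | succ m ih =>
    intro ws stk hlen hnm
    match ws with
    | [] => simp [procP]
    | w :: rest =>
      have hstep := stepP_no_merge stk w (fun p hp => hnm p hp w (by simp))
      cases hc : statesLow.contains w with
      | true =>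
        rw [List.foldl_cons, hstep, if_pos hc,
          ih rest _ (by simp at hlen; omega) (noMergeP_key _ _ _ _ hc),
          procP_cons_pos _ _ hc]
        simp
      | false =>
        match rest with
        | [] =>
          rw [List.foldl_cons, hstep, if_neg (by simp [hc]), List.foldl_nil,
            procP_one _ hc]
          simp
        | w2 :: rest' =>
          cases h2 : statesLow.contains (w ++ " " ++ w2) with
          | true =>
            rw [List.foldl_cons, hstep, if_neg (by simp [hc]), List.foldl_cons]
            have hs2 : stepP ((pyCapitalize w, w) :: stk) w2 =
                (statesLow.getD (w ++ " " ++ w2) "", w ++ " " ++ w2) :: stk := by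
              simp [stepP, h2]
            rw [hs2,
              ih rest' _ (by simp at hlen; omega) (noMergeP_key _ _ _ _ h2),
              procP_cons2_pos _ _ _ hc h2]
            simp
          | false =>
            rw [List.foldl_cons, hstep, if_neg (by simp [hc]),
              ih (w2 :: rest') ((pyCapitalize w, w) :: stk) (by simp at hlen ⊢; omega)
                (by intro p hp x hx
                    simp only [List.head?_cons, Option.mem_some_iff] at hp hx
                    subst hp; subst hx; exact h2),
              procP_cons2_neg _ _ _ hc h2]
            simp

-- ===== VERDICT (by name: the statement is the Claim_ definition above) =====
theorem fix_state_abbrevs_spec : Claim_equal_fix_state_abbrevs := by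
  intro text _
  unfold Spec_fix_state_abbrevs fix_state_abbrevs fix_state_abbrevs_alt
  rw [fixLoopA_eq_procA]
  simp only [List.drop_zero, List.nil_append]
  have hB : (PySem.Str.split₀ text).foldl stepB [] =
      ((PySem.Str.split₀ text).map PySem.Str.lower).foldl stepP [] := by
    rw [List.foldl_map]
    rfl
  rw [hB, foldl_stepP_eq_procP _ _ _ le_rfl (by intro p hp; simp at hp),
    procA_eq_procP (PySem.Str.split₀ text).length _ le_rfl (split₀_SF text)]
  simp
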